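-- pv_equiv track=rewrite | github.com/avira1987/InstituteOfPsychoanalysis | app/services/nav_pending_counts.py | _user_sees_nav_path
-- ===== SOURCE A (Python) =====
-- def _user_sees_nav_path(user_role: str, path: str) -> bool:
--     """هم‌راستا با فیلتر navItems در Layout.jsx — فقط همان مسیرهایی که کاربر در منو دارد."""
--     meta = [
--         ("/panel/portal/student", ["student"], True),
--         ("/panel/portal/therapist", ["therapist", "admin"], False),
--         ("/panel/portal/supervisor", ["supervisor", "admin"], False),
--         ("/panel/portal/staff", ["staff", "admin"], False),
--         ("/panel/portal/site-manager", ["site_manager", "admin"], False),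
--         (
--             "/panel/portal/committee",
--             [
--                 "progress_committee",
--                 "education_committee",
--                 "supervision_committee",
--                 "specialized_commission",
--                 "therapy_committee_chair",
--                 "therapy_committee_executor",
--                 "deputy_education",
--                 "monitoring_committee_officer",
--                 "admin",
--             ],
--             False,
--         ),
--         (
--             "/panel/tickets",
--             [
--                 "student",
--                 "admin",
--                 "staff",
--                 "finance",
--                 "therapist",
--                 "supervisor",
--                 "site_manager",
--                 "progress_committee",
--                 "education_committee",
--                 "supervision_committee",
--                 "specialized_commission",
--                 "therapy_committee_chair",
--                 "therapy_committee_executor",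
--                 "deputy_education",
--                 "monitoring_committee_officer",
--             ],
--             False,
--         ),
--     ]
--     for p, roles, strict in meta:
--         if p != path:
--             continue
--         in_role = user_role in roles
--         if strict:
--             return in_role
--         if not in_role and user_role != "admin":
--             return False
--         return True
--     return False
-- ===== SOURCE B (Python) =====
-- _COMMITTEE_ROLES = frozenset({
--     "progress_committee", "education_committee", "supervision_committee",
--     "specialized_commission", "therapy_committee_chair",
--     "therapy_committee_executor", "deputy_education",
--     "monitoring_committee_officer",
-- })
-- _PORTAL_ROLES = frozenset({"student", "therapist", "supervisor", "staff", "site_manager"})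
-- _PREFIX = "/panel/portal/"
--
--
-- def _user_sees_nav_path(user_role: str, path: str) -> bool:
--     # Derive the page a role may see from the role name itself instead of
--     # scanning a path table: every personal portal page is the role name with
--     # '_' turned into '-'; admin sees every portal page except the student one;
--     # the committee page is shared by the committee roles; the tickets page is
--     # open to every known role.
--     if path == "/panel/tickets":
--         return (user_role == "admin" or user_role == "finance"
--                 or user_role in _PORTAL_ROLES or user_role in _COMMITTEE_ROLES)
--     if not path.startswith(_PREFIX):
--         return False
--     page = path[len(_PREFIX):]
--     if page == "committee":
--         return user_role == "admin" or user_role in _COMMITTEE_ROLES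
--     if user_role == "admin":
--         return page in ("therapist", "supervisor", "staff", "site-manager")
--     return user_role in _PORTAL_ROLES and page == user_role.replace("_", "-")
-- ===== Notes on version B (the rewrite author's own statement) =====
-- stated objective: alternative
-- what changed: Instead of scanning A's list of (path, roles, strict) triples, B derives the answer from the role itself: it splits the path into the fixed '/panel/portal/' prefix and a page, reconstructs each role's personal portal page as the role name with '_' replaced by '-', and handles admin, the committee role set and the tickets page by their own rules; the table scan and the strict/admin-fallback branch chain disappear.
import Mathlib
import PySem

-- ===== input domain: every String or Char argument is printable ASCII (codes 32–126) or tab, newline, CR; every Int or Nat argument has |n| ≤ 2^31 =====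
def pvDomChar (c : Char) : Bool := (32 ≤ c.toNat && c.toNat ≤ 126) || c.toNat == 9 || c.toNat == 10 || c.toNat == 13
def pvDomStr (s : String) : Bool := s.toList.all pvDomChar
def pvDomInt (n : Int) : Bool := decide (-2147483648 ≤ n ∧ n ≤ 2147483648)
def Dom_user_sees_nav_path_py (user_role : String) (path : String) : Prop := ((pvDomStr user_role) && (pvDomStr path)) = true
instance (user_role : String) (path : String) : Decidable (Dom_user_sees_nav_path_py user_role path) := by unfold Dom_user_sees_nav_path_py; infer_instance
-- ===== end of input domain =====

-- B derives the visible page from the role name itself (portal page = role with '_'→'-',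
-- admin fallback, committee/tickets role sets) instead of scanning A's path table (objective: alternative).

-- ===== PORT A =====
-- the literal `meta` table of A
def pvNavMeta : List (String × List String × Bool) :=
  [ ("/panel/portal/student", ["student"], true),
    ("/panel/portal/therapist", ["therapist", "admin"], false),
    ("/panel/portal/supervisor", ["supervisor", "admin"], false),
    ("/panel/portal/staff", ["staff", "admin"], false),
    ("/panel/portal/site-manager", ["site_manager", "admin"], false),
    ("/panel/portal/committee",
      ["progress_committee", "education_committee", "supervision_committee",
       "specialized_commission", "therapy_committee_chair", "therapy_committee_executor",
       "deputy_education", "monitoring_committee_officer", "admin"], false),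
    ("/panel/tickets",
      ["student", "admin", "staff", "finance", "therapist", "supervisor",
       "site_manager", "progress_committee", "education_committee",
       "supervision_committee", "specialized_commission", "therapy_committee_chair",
       "therapy_committee_executor", "deputy_education",
       "monitoring_committee_officer"], false) ]

-- the `for p, roles, strict in meta` loop with `continue` and early returns
def pvNavLoop (user_role path : String) : List (String × List String × Bool) → Bool
  | [] => false
  | (p, roles, strict) :: rest =>
    if p ≠ path then pvNavLoop user_role path rest
    else
      let in_role := roles.contains user_role
      if strict then in_role
      else if !in_role && user_role ≠ "admin" then false
      else true

def user_sees_nav_path_py (user_role : String) (path : String) : Bool :=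
  pvNavLoop user_role path pvNavMeta

-- ===== PORT B =====
-- module-level frozensets and prefix of Source B
def pvCommitteeRoles : PySem.Set String :=
  PySem.Set.ofList
    ["progress_committee", "education_committee", "supervision_committee",
     "specialized_commission", "therapy_committee_chair",
     "therapy_committee_executor", "deputy_education",
     "monitoring_committee_officer"]

def pvPortalRoles : PySem.Set String :=
  PySem.Set.ofList ["student", "therapist", "supervisor", "staff", "site_manager"]

def pvPrefix : String := "/panel/portal/"

def user_sees_nav_path_py_alt (user_role : String) (path : String) : Bool :=
  if path = "/panel/tickets" then
    user_role == "admin" || user_role == "finance"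
      || PySem.Set.contains pvPortalRoles user_role
      || PySem.Set.contains pvCommitteeRoles user_role
  else if !PySem.Str.startswith path pvPrefix then false
  else
    let page := PySem.Str.slice path (some (PySem.Str.len pvPrefix)) none
    if page = "committee" then
      user_role == "admin" || PySem.Set.contains pvCommitteeRoles user_role
    else if user_role = "admin" then
      (["therapist", "supervisor", "staff", "site-manager"] : List String).contains page
    else
      PySem.Set.contains pvPortalRoles user_role
        && (page == PySem.Str.replace user_role "_" "-")

-- ===== PRECONDITION & SPEC =====
def Spec_user_sees_nav_path_py (user_role : String) (path : String) (out : Bool) : Prop := out = user_sees_nav_path_py_alt user_role path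
instance (user_role : String) (path : String) (out : Bool) : Decidable (Spec_user_sees_nav_path_py user_role path out) := by unfold Spec_user_sees_nav_path_py; infer_instance

-- ===== CLAIM (what is proved, stated in full; the proofs are below) =====
def Claim_equal_user_sees_nav_path_py : Prop := ∀ (user_role : String) (path : String), Dom_user_sees_nav_path_py user_role path → Spec_user_sees_nav_path_py user_role path (user_sees_nav_path_py user_role path)

-- ===== LEMMAS AND PROOFS =====

-- if path starts with the prefix, path is the prefix followed by its page (as char lists)
theorem pvRecon (path : String) (hsw : PySem.Str.startswith path pvPrefix = true) :
    path.toList = pvPrefix.toList ++ path.toList.drop 14 := by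
  have h := (PySem.Chars.startswith_iff path.toList pvPrefix.toList).mp
    (by simpa [PySem.Str.startswith_eq] using hsw)
  obtain ⟨t, ht⟩ := h
  have hl : (pvPrefix.toList).length = 14 := by decide
  have hd : path.toList.drop 14 = t := by
    rw [← ht, ← hl, List.drop_left]
  rw [hd, ht]

-- the char-list of the page slice
theorem pvPageList (path : String) :
    (PySem.Str.slice path (some ((pvPrefix.length : Int))) none).toList = path.toList.drop 14 := by
  rw [show ((pvPrefix.length : Int)) = ((14 : Nat) : Int) by decide, PySem.Str.toList_slice]
  simpa using PySem.List.slice_from_natCast path.toList 14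

-- if path ≠ lit (= prefix ++ suf) then the page slice is not suf
theorem pvPageNe (path : String) (hsw : PySem.Str.startswith path pvPrefix = true)
    (suf lit : String) (hlit : pvPrefix.toList ++ suf.toList = lit.toList)
    (hne : ¬ path = lit) :
    ¬ (PySem.Str.slice path (some ((pvPrefix.length : Int))) none = suf) := by
  intro hs
  apply hne
  apply String.toList_inj.mp
  have hp := pvPageList path
  rw [hs] at hp
  rw [pvRecon path hsw, ← hp, hlit]

-- ===== VERDICT (by name: the statement is the Claim_ definition above) =====
set_option maxHeartbeats 4000000 in
theorem user_sees_nav_path_py_spec : Claim_equal_user_sees_nav_path_py := by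
  intro ur path _
  unfold Spec_user_sees_nav_path_py
  by_cases hp1 : path = "/panel/portal/student"
  · subst hp1
    by_cases hr1 : ur = "student"
    · subst hr1; decide
    by_cases hr2 : ur = "therapist"
    · subst hr2; decide
    by_cases hr3 : ur = "supervisor"
    · subst hr3; decide
    by_cases hr4 : ur = "staff"
    · subst hr4; decide
    by_cases hr5 : ur = "site_manager"
    · subst hr5; decide
    by_cases hr6 : ur = "admin"
    · subst hr6; decide
    by_cases hr7 : ur = "finance"
    · subst hr7; decide
    by_cases hr8 : ur = "progress_committee"
    · subst hr8; decide
    by_cases hr9 : ur = "education_committee"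
    · subst hr9; decide
    by_cases hr10 : ur = "supervision_committee"
    · subst hr10; decide
    by_cases hr11 : ur = "specialized_commission"
    · subst hr11; decide
    by_cases hr12 : ur = "therapy_committee_chair"
    · subst hr12; decide
    by_cases hr13 : ur = "therapy_committee_executor"
    · subst hr13; decide
    by_cases hr14 : ur = "deputy_education"
    · subst hr14; decide
    by_cases hr15 : ur = "monitoring_committee_officer"
    · subst hr15; decide
    simp [user_sees_nav_path_py, pvNavLoop, pvNavMeta, user_sees_nav_path_py_alt, pvPortalRoles, pvCommitteeRoles, PySem.Set.ofList, hr1, hr2, hr3, hr4, hr5, hr6, hr8, hr9, hr10, hr11, hr12, hr13, hr14, hr15]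
  by_cases hp2 : path = "/panel/portal/therapist"
  · subst hp2
    by_cases hr1 : ur = "student"
    · subst hr1; decide
    by_cases hr2 : ur = "therapist"
    · subst hr2; decide
    by_cases hr3 : ur = "supervisor"
    · subst hr3; decide
    by_cases hr4 : ur = "staff"
    · subst hr4; decide
    by_cases hr5 : ur = "site_manager"
    · subst hr5; decide
    by_cases hr6 : ur = "admin"
    · subst hr6; decide
    by_cases hr7 : ur = "finance"
    · subst hr7; decide
    by_cases hr8 : ur = "progress_committee"
    · subst hr8; decide
    by_cases hr9 : ur = "education_committee"
    · subst hr9; decide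
    by_cases hr10 : ur = "supervision_committee"
    · subst hr10; decide
    by_cases hr11 : ur = "specialized_commission"
    · subst hr11; decide
    by_cases hr12 : ur = "therapy_committee_chair"
    · subst hr12; decide
    by_cases hr13 : ur = "therapy_committee_executor"
    · subst hr13; decide
    by_cases hr14 : ur = "deputy_education"
    · subst hr14; decide
    by_cases hr15 : ur = "monitoring_committee_officer"
    · subst hr15; decide
    simp [user_sees_nav_path_py, pvNavLoop, pvNavMeta, user_sees_nav_path_py_alt, pvPortalRoles, pvCommitteeRoles, PySem.Set.ofList, hr1, hr2, hr3, hr4, hr5, hr6, hr8, hr9, hr10, hr11, hr12, hr13, hr14, hr15]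
  by_cases hp3 : path = "/panel/portal/supervisor"
  · subst hp3
    by_cases hr1 : ur = "student"
    · subst hr1; decide
    by_cases hr2 : ur = "therapist"
    · subst hr2; decide
    by_cases hr3 : ur = "supervisor"
    · subst hr3; decide
    by_cases hr4 : ur = "staff"
    · subst hr4; decide
    by_cases hr5 : ur = "site_manager"
    · subst hr5; decide
    by_cases hr6 : ur = "admin"
    · subst hr6; decide
    by_cases hr7 : ur = "finance"
    · subst hr7; decide
    by_cases hr8 : ur = "progress_committee"
    · subst hr8; decide
    by_cases hr9 : ur = "education_committee"
    · subst hr9; decide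
    by_cases hr10 : ur = "supervision_committee"
    · subst hr10; decide
    by_cases hr11 : ur = "specialized_commission"
    · subst hr11; decide
    by_cases hr12 : ur = "therapy_committee_chair"
    · subst hr12; decide
    by_cases hr13 : ur = "therapy_committee_executor"
    · subst hr13; decide
    by_cases hr14 : ur = "deputy_education"
    · subst hr14; decide
    by_cases hr15 : ur = "monitoring_committee_officer"
    · subst hr15; decide
    simp [user_sees_nav_path_py, pvNavLoop, pvNavMeta, user_sees_nav_path_py_alt, pvPortalRoles, pvCommitteeRoles, PySem.Set.ofList, hr1, hr2, hr3, hr4, hr5, hr6, hr8, hr9, hr10, hr11, hr12, hr13, hr14, hr15]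
  by_cases hp4 : path = "/panel/portal/staff"
  · subst hp4
    by_cases hr1 : ur = "student"
    · subst hr1; decide
    by_cases hr2 : ur = "therapist"
    · subst hr2; decide
    by_cases hr3 : ur = "supervisor"
    · subst hr3; decide
    by_cases hr4 : ur = "staff"
    · subst hr4; decide
    by_cases hr5 : ur = "site_manager"
    · subst hr5; decide
    by_cases hr6 : ur = "admin"
    · subst hr6; decide
    by_cases hr7 : ur = "finance"
    · subst hr7; decide
    by_cases hr8 : ur = "progress_committee"
    · subst hr8; decide
    by_cases hr9 : ur = "education_committee"
    · subst hr9; decide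
    by_cases hr10 : ur = "supervision_committee"
    · subst hr10; decide
    by_cases hr11 : ur = "specialized_commission"
    · subst hr11; decide
    by_cases hr12 : ur = "therapy_committee_chair"
    · subst hr12; decide
    by_cases hr13 : ur = "therapy_committee_executor"
    · subst hr13; decide
    by_cases hr14 : ur = "deputy_education"
    · subst hr14; decide
    by_cases hr15 : ur = "monitoring_committee_officer"
    · subst hr15; decide
    simp [user_sees_nav_path_py, pvNavLoop, pvNavMeta, user_sees_nav_path_py_alt, pvPortalRoles, pvCommitteeRoles, PySem.Set.ofList, hr1, hr2, hr3, hr4, hr5, hr6, hr8, hr9, hr10, hr11, hr12, hr13, hr14, hr15]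
  by_cases hp5 : path = "/panel/portal/site-manager"
  · subst hp5
    by_cases hr1 : ur = "student"
    · subst hr1; decide
    by_cases hr2 : ur = "therapist"
    · subst hr2; decide
    by_cases hr3 : ur = "supervisor"
    · subst hr3; decide
    by_cases hr4 : ur = "staff"
    · subst hr4; decide
    by_cases hr5 : ur = "site_manager"
    · subst hr5; decide
    by_cases hr6 : ur = "admin"
    · subst hr6; decide
    by_cases hr7 : ur = "finance"
    · subst hr7; decide
    by_cases hr8 : ur = "progress_committee"
    · subst hr8; decide
    by_cases hr9 : ur = "education_committee"
    · subst hr9; decide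
    by_cases hr10 : ur = "supervision_committee"
    · subst hr10; decide
    by_cases hr11 : ur = "specialized_commission"
    · subst hr11; decide
    by_cases hr12 : ur = "therapy_committee_chair"
    · subst hr12; decide
    by_cases hr13 : ur = "therapy_committee_executor"
    · subst hr13; decide
    by_cases hr14 : ur = "deputy_education"
    · subst hr14; decide
    by_cases hr15 : ur = "monitoring_committee_officer"
    · subst hr15; decide
    simp [user_sees_nav_path_py, pvNavLoop, pvNavMeta, user_sees_nav_path_py_alt, pvPortalRoles, pvCommitteeRoles, PySem.Set.ofList, hr1, hr2, hr3, hr4, hr5, hr6, hr8, hr9, hr10, hr11, hr12, hr13, hr14, hr15]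
  by_cases hp6 : path = "/panel/portal/committee"
  · subst hp6
    by_cases hr1 : ur = "student"
    · subst hr1; decide
    by_cases hr2 : ur = "therapist"
    · subst hr2; decide
    by_cases hr3 : ur = "supervisor"
    · subst hr3; decide
    by_cases hr4 : ur = "staff"
    · subst hr4; decide
    by_cases hr5 : ur = "site_manager"
    · subst hr5; decide
    by_cases hr6 : ur = "admin"
    · subst hr6; decide
    by_cases hr7 : ur = "finance"
    · subst hr7; decide
    by_cases hr8 : ur = "progress_committee"
    · subst hr8; decide
    by_cases hr9 : ur = "education_committee"
    · subst hr9; decide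
    by_cases hr10 : ur = "supervision_committee"
    · subst hr10; decide
    by_cases hr11 : ur = "specialized_commission"
    · subst hr11; decide
    by_cases hr12 : ur = "therapy_committee_chair"
    · subst hr12; decide
    by_cases hr13 : ur = "therapy_committee_executor"
    · subst hr13; decide
    by_cases hr14 : ur = "deputy_education"
    · subst hr14; decide
    by_cases hr15 : ur = "monitoring_committee_officer"
    · subst hr15; decide
    simp [user_sees_nav_path_py, pvNavLoop, pvNavMeta, user_sees_nav_path_py_alt, pvPortalRoles, pvCommitteeRoles, PySem.Set.ofList, hr1, hr2, hr3, hr4, hr5, hr6, hr8, hr9, hr10, hr11, hr12, hr13, hr14, hr15]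
  by_cases hp7 : path = "/panel/tickets"
  · subst hp7
    by_cases hr1 : ur = "student"
    · subst hr1; decide
    by_cases hr2 : ur = "therapist"
    · subst hr2; decide
    by_cases hr3 : ur = "supervisor"
    · subst hr3; decide
    by_cases hr4 : ur = "staff"
    · subst hr4; decide
    by_cases hr5 : ur = "site_manager"
    · subst hr5; decide
    by_cases hr6 : ur = "admin"
    · subst hr6; decide
    by_cases hr7 : ur = "finance"
    · subst hr7; decide
    by_cases hr8 : ur = "progress_committee"
    · subst hr8; decide
    by_cases hr9 : ur = "education_committee"
    · subst hr9; decide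
    by_cases hr10 : ur = "supervision_committee"
    · subst hr10; decide
    by_cases hr11 : ur = "specialized_commission"
    · subst hr11; decide
    by_cases hr12 : ur = "therapy_committee_chair"
    · subst hr12; decide
    by_cases hr13 : ur = "therapy_committee_executor"
    · subst hr13; decide
    by_cases hr14 : ur = "deputy_education"
    · subst hr14; decide
    by_cases hr15 : ur = "monitoring_committee_officer"
    · subst hr15; decide
    simp [user_sees_nav_path_py, pvNavLoop, pvNavMeta, user_sees_nav_path_py_alt, pvPortalRoles, pvCommitteeRoles, PySem.Set.ofList, hr1, hr2, hr3, hr4, hr5, hr6, hr7, hr8, hr9, hr10, hr11, hr12, hr13, hr14, hr15]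
  -- path matches none of the table paths: both sides are false
  have hA : user_sees_nav_path_py ur path = false := by
    simp [user_sees_nav_path_py, pvNavLoop, pvNavMeta, (Ne.symm hp1), (Ne.symm hp2), (Ne.symm hp3), (Ne.symm hp4), (Ne.symm hp5), (Ne.symm hp6), (Ne.symm hp7)]
  rw [hA]
  by_cases hsw : PySem.Str.startswith path pvPrefix = true
  case neg => simp only [PySem.Str.startswith_eq] at hsw; simp [user_sees_nav_path_py_alt, hp7, hsw]
  have n1 := pvPageNe path hsw "student" "/panel/portal/student" (by decide) hp1
  have n1' : ¬ ("student" = PySem.Str.slice path (some ((pvPrefix.length : Int))) none) := fun h => n1 h.symm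
  have n2 := pvPageNe path hsw "therapist" "/panel/portal/therapist" (by decide) hp2
  have n2' : ¬ ("therapist" = PySem.Str.slice path (some ((pvPrefix.length : Int))) none) := fun h => n2 h.symm
  have n3 := pvPageNe path hsw "supervisor" "/panel/portal/supervisor" (by decide) hp3
  have n3' : ¬ ("supervisor" = PySem.Str.slice path (some ((pvPrefix.length : Int))) none) := fun h => n3 h.symm
  have n4 := pvPageNe path hsw "staff" "/panel/portal/staff" (by decide) hp4
  have n4' : ¬ ("staff" = PySem.Str.slice path (some ((pvPrefix.length : Int))) none) := fun h => n4 h.symm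
  have n5 := pvPageNe path hsw "site-manager" "/panel/portal/site-manager" (by decide) hp5
  have n5' : ¬ ("site-manager" = PySem.Str.slice path (some ((pvPrefix.length : Int))) none) := fun h => n5 h.symm
  have n6 := pvPageNe path hsw "committee" "/panel/portal/committee" (by decide) hp6
  have n6' : ¬ ("committee" = PySem.Str.slice path (some ((pvPrefix.length : Int))) none) := fun h => n6 h.symm
  have rp1 : PySem.Str.replace "student" "_" "-" = "student" := by decide
  have rp2 : PySem.Str.replace "therapist" "_" "-" = "therapist" := by decide
  have rp3 : PySem.Str.replace "supervisor" "_" "-" = "supervisor" := by decide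
  have rp4 : PySem.Str.replace "staff" "_" "-" = "staff" := by decide
  have rp5 : PySem.Str.replace "site_manager" "_" "-" = "site-manager" := by decide
  by_cases hr1 : ur = "student"
  · subst hr1; simp [user_sees_nav_path_py_alt, hp7, pvPortalRoles, PySem.Set.ofList, n1, n6, rp1]
  by_cases hr2 : ur = "therapist"
  · subst hr2; simp [user_sees_nav_path_py_alt, hp7, pvPortalRoles, PySem.Set.ofList, n2, n6, rp2]
  by_cases hr3 : ur = "supervisor"
  · subst hr3; simp [user_sees_nav_path_py_alt, hp7, pvPortalRoles, PySem.Set.ofList, n3, n6, rp3]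
  by_cases hr4 : ur = "staff"
  · subst hr4; simp [user_sees_nav_path_py_alt, hp7, pvPortalRoles, PySem.Set.ofList, n4, n6, rp4]
  by_cases hr5 : ur = "site_manager"
  · subst hr5; simp [user_sees_nav_path_py_alt, hp7, pvPortalRoles, PySem.Set.ofList, n5, n6, rp5]
  by_cases hadm : ur = "admin"
  · subst hadm; simp [user_sees_nav_path_py_alt, hp7, n2, n3, n4, n5, n6, ]
  simp [user_sees_nav_path_py_alt, hp7, pvPortalRoles, PySem.Set.ofList, n6, hr1, hr2, hr3, hr4, hr5, hadm]
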